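-- pv_equiv track=rewrite | github.com/IvoPaitano/algEstrc | apunteTeorico.py | e841c
-- ===== SOURCE A (Python) =====
-- def e841b(listaDesordenada, elemento):
--     indice = -1
--     if elemento in listaDesordenada:
--         indice = listaDesordenada.index(elemento)
--         return indice
--     else:
--         return indice
--
-- def e841c(listaDesordenada, elemento):
--     pos = []
--     while True:
--         ind = e841b(listaDesordenada, elemento)
--         if ind == -1:
--             break
--         else:
--             pos.append(ind)
--             inicio = ind + 1
--             listaDesordenada = listaDesordenada[inicio:]
--     return pos
-- ===== SOURCE B (Python) =====
-- def e841c(listaDesordenada, elemento):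
--     # Build all absolute indices of the element in one pass, then turn them
--     # into relative offsets by differencing consecutive indices.
--     idxs = [i for i, x in enumerate(listaDesordenada) if x == elemento]
--     pos = []
--     prev = -1
--     for i in idxs:
--         pos.append(i - prev - 1)
--         prev = i
--     return pos
-- ===== Notes on version B (the rewrite author's own statement) =====
-- stated objective: simpler
-- what changed: Replaces the repeated membership-test/.index/slice passes over shrinking suffixes with a single enumerate pass collecting absolute indices followed by one differencing pass with a prev accumulator.
import Mathlib
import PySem

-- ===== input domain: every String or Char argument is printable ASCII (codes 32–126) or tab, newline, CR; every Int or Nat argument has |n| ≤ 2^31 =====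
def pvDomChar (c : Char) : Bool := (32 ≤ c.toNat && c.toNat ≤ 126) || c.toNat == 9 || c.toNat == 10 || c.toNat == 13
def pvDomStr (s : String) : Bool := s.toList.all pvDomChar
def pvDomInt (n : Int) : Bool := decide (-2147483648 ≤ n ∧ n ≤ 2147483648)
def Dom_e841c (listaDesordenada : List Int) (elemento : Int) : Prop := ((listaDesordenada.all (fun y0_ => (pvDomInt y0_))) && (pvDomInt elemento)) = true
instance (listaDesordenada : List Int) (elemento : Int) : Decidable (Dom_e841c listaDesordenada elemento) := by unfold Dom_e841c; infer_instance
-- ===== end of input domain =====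

-- B replaces A's repeated membership/.index/slice passes over shrinking suffixes by one
-- enumerate pass collecting absolute indices plus one differencing pass (objective: simpler).

-- ===== PORT A =====
def e841b (listaDesordenada : List Int) (elemento : Int) : Int :=
  let indice : Int := -1
  if elemento ∈ listaDesordenada then
    match PySem.List.index? listaDesordenada elemento with
    | some n => (n : Int)
    | none => indice
  else indice

-- termination helper for the while loop of A: a successful step strictly shrinks the list
theorem e841c_slice_lt (l : List Int) (e : Int) (h : ¬ e841b l e = -1) :
    (PySem.List.slice l (some (e841b l e + 1)) none).length < l.length := by
  by_cases hm : e ∈ l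
  · rcases hk : PySem.List.index? l e with _ | k
    · exact absurd hm ((PySem.List.index?_eq_none_iff l e).mp hk)
    · have hb : e841b l e = (k : Int) := by
        unfold e841b; rw [if_pos hm, hk]
      rw [hb]
      have hlen : 0 < l.length := List.length_pos_iff.mpr (List.ne_nil_of_mem hm)
      rw [PySem.List.slice_from l (show (0:Int) ≤ (k : Int) + 1 by omega)]
      simp only [List.length_drop]
      omega
  · exact absurd (by unfold e841b; rw [if_neg hm]) h

def e841cLoop (listaDesordenada : List Int) (elemento : Int) (pos : List Int) : List Int :=
  let ind := e841b listaDesordenada elemento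
  if ind = -1 then pos
  else e841cLoop (PySem.List.slice listaDesordenada (some (ind + 1)) none) elemento (pos ++ [ind])
termination_by listaDesordenada.length
decreasing_by exact e841c_slice_lt _ _ (by assumption)

def e841c (listaDesordenada : List Int) (elemento : Int) : List Int :=
  e841cLoop listaDesordenada elemento []

-- ===== PORT B =====
def e841c_alt (listaDesordenada : List Int) (elemento : Int) : List Int :=
  let idxs : List Int := (PySem.List.enumerate listaDesordenada).filterMap
      (fun p => if p.2 = elemento then some p.1 else none)
  (idxs.foldl (fun (st : List Int × Int) i => (st.1 ++ [i - st.2 - 1], i))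
      (([] : List Int), (-1 : Int))).1

-- ===== PRECONDITION & SPEC =====
def Spec_e841c (listaDesordenada : List Int) (elemento : Int) (out : List Int) : Prop := out = e841c_alt listaDesordenada elemento
instance (listaDesordenada : List Int) (elemento : Int) (out : List Int) : Decidable (Spec_e841c listaDesordenada elemento out) := by unfold Spec_e841c; infer_instance

-- ===== CLAIM (what is proved, stated in full; the proofs are below) =====
def Claim_equal_e841c : Prop := ∀ (listaDesordenada : List Int) (elemento : Int), Dom_e841c listaDesordenada elemento → Spec_e841c listaDesordenada elemento (e841c listaDesordenada elemento)

-- ===== LEMMAS AND PROOFS =====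

-- canonical structural recursion both programs are reduced to
def pvF : List Int → Int → List Int
  | [], _ => []
  | x :: xs, e =>
    if x = e then 0 :: pvF xs e
    else
      match pvF xs e with
      | [] => []
      | h :: t => (h + 1) :: t

-- index collector of B, with an arbitrary enumerate start
def pvIdxs (e : Int) (s : Int) (l : List Int) : List Int :=
  (PySem.List.enumerate l s).filterMap (fun p => if p.2 = e then some p.1 else none)

-- differencing fold of B
def pvStep : List Int × Int → Int → List Int × Int := fun st i => (st.1 ++ [i - st.2 - 1], i)

theorem pvIdxs_nil (e s : Int) : pvIdxs e s [] = [] := by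
  simp [pvIdxs, PySem.List.enumerate_nil]

theorem pvIdxs_cons (e s : Int) (x : Int) (xs : List Int) :
    pvIdxs e s (x :: xs) = if x = e then s :: pvIdxs e (s + 1) xs else pvIdxs e (s + 1) xs := by
  simp only [pvIdxs, PySem.List.enumerate_cons, List.filterMap_cons]
  split_ifs with h <;> simp

theorem pvIdxs_shift (e : Int) (l : List Int) : ∀ s : Int, pvIdxs e s l = (pvIdxs e 0 l).map (· + s) := by
  induction l with
  | nil => intro s; simp [pvIdxs_nil]
  | cons x xs ih =>
    intro s
    rw [pvIdxs_cons, pvIdxs_cons]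
    split_ifs with h
    · rw [ih (s + 1), ih (0 + 1), List.map_cons, List.map_map]
      congr 1
      · omega
      · apply List.map_congr_left; intro a _; simp [Function.comp]; omega
    · rw [ih (s + 1), ih (0 + 1), List.map_map]
      apply List.map_congr_left; intro a _; simp [Function.comp]; omega

theorem pvFold_acc (l : List Int) : ∀ (acc : List Int) (p : Int),
    (l.foldl pvStep (acc, p)).1 = acc ++ (l.foldl pvStep ([], p)).1 := by
  induction l with
  | nil => intro acc p; simp
  | cons i l ih =>
    intro acc p
    simp only [List.foldl_cons, pvStep, List.nil_append]
    rw [ih (acc ++ [i - p - 1]) i, ih [i - p - 1] i]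
    simp

theorem pvFold_shift (l : List Int) (s : Int) : ∀ p : Int,
    ((l.map (· + s)).foldl pvStep ([], p + s)).1 = (l.foldl pvStep ([], p)).1 := by
  induction l with
  | nil => intro p; simp
  | cons i l ih =>
    intro p
    simp only [List.map_cons, List.foldl_cons, pvStep, List.nil_append]
    have h1 : i + s - (p + s) - 1 = i - p - 1 := by omega
    rw [h1, pvFold_acc, pvFold_acc (l := l)]
    congr 1
    exact ih i

theorem e841c_alt_eq_fold (l : List Int) (e : Int) :
    e841c_alt l e = ((pvIdxs e 0 l).foldl pvStep ([], -1)).1 := rfl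

theorem B_eq_pvF (l : List Int) (e : Int) : e841c_alt l e = pvF l e := by
  induction l with
  | nil => simp [e841c_alt_eq_fold, pvIdxs_nil, pvF]
  | cons x xs ih =>
    rw [e841c_alt_eq_fold, pvIdxs_cons]
    simp only [zero_add]
    split_ifs with h
    · -- head matches: first offset is 0
      rw [pvIdxs_shift e xs 1]
      simp only [List.foldl_cons, pvStep, List.nil_append]
      have h0 : (0 : Int) - (-1) - 1 = 0 := by omega
      rw [h0, pvFold_acc]
      have hs : ((pvIdxs e 0 xs).map (· + 1)).foldl pvStep ([], (0:Int)) =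
          ((pvIdxs e 0 xs).map (· + 1)).foldl pvStep ([], (-1) + 1) := by norm_num
      rw [hs]
      rw [show (((pvIdxs e 0 xs).map (· + 1)).foldl pvStep ([], (-1) + 1)).1
            = ((pvIdxs e 0 xs).foldl pvStep ([], -1)).1 from pvFold_shift _ 1 (-1)]
      rw [← e841c_alt_eq_fold, ih]
      simp [pvF, h]
    · -- head differs: every index shifts by one, so only the first offset grows by one
      rw [pvIdxs_shift e xs 1]
      rcases hx : pvIdxs e 0 xs with _ | ⟨k, rest⟩
      · simp only [List.map_nil, List.foldl_nil]
        have hB : e841c_alt xs e = [] := by rw [e841c_alt_eq_fold, hx]; simp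
        rw [hB] at ih
        simp [pvF, h, ← ih]
      · simp only [List.map_cons, List.foldl_cons, pvStep, List.nil_append]
        rw [pvFold_acc]
        have hsh : ((rest.map (· + 1)).foldl pvStep ([], k + 1)).1 = (rest.foldl pvStep ([], k)).1 :=
          pvFold_shift rest 1 k
        rw [hsh]
        have hBxs : e841c_alt xs e = (k - (-1) - 1) :: (rest.foldl pvStep ([], k)).1 := by
          rw [e841c_alt_eq_fold, hx]
          simp only [List.foldl_cons, pvStep, List.nil_append]
          rw [pvFold_acc]
          simp
        rw [ih] at hBxs
        simp only [pvF, if_neg h, hBxs]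
        simp

theorem pvLoop_stop (l : List Int) (e : Int) (pos : List Int) (hind : e841b l e = -1) :
    e841cLoop l e pos = pos := by
  rw [e841cLoop]; simp [hind]

theorem pvLoop_go (l : List Int) (e : Int) (pos : List Int) (hind : ¬ e841b l e = -1) :
    e841cLoop l e pos
      = e841cLoop (PySem.List.slice l (some (e841b l e + 1)) none) e (pos ++ [e841b l e]) := by
  rw [e841cLoop]; simp [hind]

theorem pvLoop_acc_aux (e : Int) (n : Nat) : ∀ l : List Int, l.length ≤ n → ∀ pos : List Int,
    e841cLoop l e pos = pos ++ e841cLoop l e [] := by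
  induction n with
  | zero =>
    intro l hl pos
    have h0 : l = [] := List.eq_nil_of_length_eq_zero (Nat.le_zero.mp hl)
    subst h0
    have hb : e841b ([] : List Int) e = -1 := by unfold e841b; simp
    rw [pvLoop_stop _ _ _ hb, pvLoop_stop _ _ _ hb]
    simp
  | succ n ih =>
    intro l hl pos
    by_cases hind : e841b l e = -1
    · rw [pvLoop_stop _ _ _ hind, pvLoop_stop _ _ _ hind]; simp
    · have hlt := e841c_slice_lt l e hind
      rw [pvLoop_go _ _ _ hind, pvLoop_go _ _ [] hind,
        ih _ (by omega), ih _ (by omega) ([] ++ [e841b l e])]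
      simp

theorem e841cLoop_acc (l : List Int) (e : Int) : ∀ pos : List Int,
    e841cLoop l e pos = pos ++ e841cLoop l e [] :=
  pvLoop_acc_aux e l.length l (Nat.le_refl _)

theorem A_eq_pvF (l : List Int) (e : Int) : e841c l e = pvF l e := by
  induction l with
  | nil =>
    rw [e841c, e841cLoop]
    simp [e841b, pvF]
  | cons x xs ih =>
    by_cases h : x = e
    · -- element found at head: index 0, recurse on the tail
      subst h
      have hb : e841b (x :: xs) x = 0 := by
        unfold e841b
        rw [if_pos (by simp), PySem.List.index?_cons_self]
        simp
      rw [e841c, e841cLoop]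
      simp only [hb]
      norm_num
      rw [PySem.List.slice_from (x :: xs) (show (0:Int) ≤ 1 by norm_num)]
      have hone : ((1 : Int)).toNat = 1 := rfl
      rw [hone]
      simp only [List.drop_one, List.tail_cons]
      rw [e841cLoop_acc, ← e841c, ih]
      simp [pvF]
    · -- head differs: A's first hit shifts by one, later hits are as in xs
      rcases hk : PySem.List.index? xs e with _ | k
      · -- not present at all
        have hm : e ∉ (x :: xs) := by
          intro hmem
          rcases List.mem_cons.mp hmem with h1 | h2
          · exact h h1.symm
          · exact ((PySem.List.index?_eq_none_iff xs e).mp hk) h2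
        have hb : e841b (x :: xs) e = -1 := by unfold e841b; rw [if_neg hm]
        rw [e841c, e841cLoop]
        simp only [hb, reduceIte]
        have hxs : e841c xs e = [] := by
          have hbx : e841b xs e = -1 := by
            unfold e841b
            rw [if_neg ((PySem.List.index?_eq_none_iff xs e).mp hk)]
          rw [e841c, e841cLoop]; simp [hbx]
        rw [hxs] at ih
        simp [pvF, h, ← ih]
      · -- present in the tail at index k
        have hmxs : e ∈ xs := (PySem.List.index?_isSome_iff xs e).mp (by rw [hk]; rfl)
        have hb : e841b (x :: xs) e = (k : Int) + 1 := by
          unfold e841b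
          rw [if_pos (List.mem_cons_of_mem _ hmxs), PySem.List.index?_cons_of_ne _ h, hk]
          simp
        have hbx : e841b xs e = (k : Int) := by
          unfold e841b
          rw [if_pos hmxs, hk]
        have hne : ¬ ((k : Int) + 1 = -1) := by omega
        have hnek : ¬ ((k : Int) = -1) := by omega
        rw [e841c, e841cLoop]
        simp only [hb, if_neg hne]
        have hsl : PySem.List.slice (x :: xs) (some ((k : Int) + 1 + 1)) none = xs.drop (k + 1) := by
          rw [PySem.List.slice_from (x :: xs) (show (0:Int) ≤ (k:Int) + 1 + 1 by omega)]
          have : ((k : Int) + 1 + 1).toNat = k + 2 := by omega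
          rw [this]
          simp [List.drop_succ_cons]
        rw [hsl, e841cLoop_acc]
        have hxs : e841c xs e = (k : Int) :: e841cLoop (xs.drop (k + 1)) e [] := by
          rw [e841c, e841cLoop]
          simp only [hbx, if_neg hnek]
          rw [PySem.List.slice_from xs (show (0:Int) ≤ (k:Int) + 1 by omega)]
          have : ((k : Int) + 1).toNat = k + 1 := by omega
          rw [this, e841cLoop_acc]
          simp
        rw [hxs] at ih
        simp only [pvF, if_neg h, ← ih]
        simp

-- ===== VERDICT (by name: the statement is the Claim_ definition above) =====
theorem e841c_spec : Claim_equal_e841c := by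
  intro l e _
  unfold Spec_e841c
  rw [A_eq_pvF, B_eq_pvF]
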